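-- pv_equiv track=rewrite | github.com/MrBrantCode/unitest_baseline | mut_generate/mist_train_cf/cf_62042/solution.py | strange_sort_list_bst
-- ===== SOURCE A (Python) =====
-- def strange_sort_list_bst(lst):
--     lst.sort()
--     output = []
--     while lst:
--         output.append(lst.pop(0))
--         if lst:
--             output.append(lst.pop(-1))
--     return output
-- ===== SOURCE B (Python) =====
-- def strange_sort_list_bst(lst):
--     # Note: A sorts/empties lst in place; this equivalence is about the return value.
--     s = sorted(lst)
--     n = len(s)
--     h = (n + 1) // 2
--     out = []
--     for a, b in zip(s[:h], reversed(s[h:])):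
--         out += [a, b]
--     if n % 2:
--         out.append(s[n // 2])
--     return out
-- ===== Notes on version B (the rewrite author's own statement) =====
-- stated objective: faster
-- what changed: Replaces the quadratic pop(0)/pop(-1) consumption loop with one sort followed by a single linear zip over the two halves (front half paired with the reversed back half), plus the middle element for odd length.
import Mathlib
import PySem

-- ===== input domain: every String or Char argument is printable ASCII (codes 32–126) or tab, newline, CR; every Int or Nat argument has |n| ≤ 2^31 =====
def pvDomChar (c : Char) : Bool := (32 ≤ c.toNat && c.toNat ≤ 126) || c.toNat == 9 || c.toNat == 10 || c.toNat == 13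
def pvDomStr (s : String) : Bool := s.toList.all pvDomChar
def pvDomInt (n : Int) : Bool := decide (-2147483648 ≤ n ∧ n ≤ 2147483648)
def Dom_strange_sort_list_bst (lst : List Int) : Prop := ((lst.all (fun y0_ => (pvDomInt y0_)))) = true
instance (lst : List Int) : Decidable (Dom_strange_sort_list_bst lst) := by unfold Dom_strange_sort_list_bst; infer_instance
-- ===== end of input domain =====

-- B replaces A's quadratic pop(0)/pop(-1) loop by one zip over the sorted halves (faster,
-- asymptotic); A empties its argument in place — the equivalence proved is about the return value.


-- ===== PORT A =====
-- the while loop: output.append(lst.pop(0)); if lst: output.append(lst.pop(-1))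
def pvGoA : List Int → List Int
  | [] => []
  | x :: rest =>
    match h : PySem.List.pop? rest (-1) with
    | none => [x]
    | some (y, rest') => x :: y :: pvGoA rest'
termination_by s => s.length
decreasing_by
  have := PySem.List.length_of_pop?_eq_some rest h
  simp at this ⊢; omega

def strange_sort_list_bst (lst : List Int) : List Int :=
  pvGoA (PySem.List.sorted lst (fun x => x) false)

-- ===== PORT B =====
def strange_sort_list_bst_alt (lst : List Int) : List Int :=
  let s := PySem.List.sorted lst (fun x => x) false
  let n := s.length
  let h := (n + 1) / 2          -- lengths are Nat, so Nat '/' is Python's '//' here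
  let out := ((s.take h).zip (s.drop h).reverse).foldl (fun acc p => acc ++ [p.1, p.2]) []
  if n % 2 = 1 then out ++ [s.getD (n / 2) 0] else out   -- index n//2 is in range when n is odd

-- ===== PRECONDITION & SPEC =====
def Spec_strange_sort_list_bst (lst : List Int) (out : List Int) : Prop := out = strange_sort_list_bst_alt lst
instance (lst : List Int) (out : List Int) : Decidable (Spec_strange_sort_list_bst lst out) := by unfold Spec_strange_sort_list_bst; infer_instance

-- ===== CLAIM (what is proved, stated in full; the proofs are below) =====
def Claim_equal_strange_sort_list_bst : Prop := ∀ (lst : List Int), Dom_strange_sort_list_bst lst → Spec_strange_sort_list_bst lst (strange_sort_list_bst lst)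

-- ===== LEMMAS AND PROOFS =====

-- B's body as a function of the sorted list
def pvWeaveB (s : List Int) : List Int :=
  ((s.take ((s.length + 1) / 2)).zip (s.drop ((s.length + 1) / 2)).reverse).flatMap
      (fun p => [p.1, p.2])
    ++ (if s.length % 2 = 1 then [s.getD (s.length / 2) 0] else [])

lemma pvAlt_eq_weaveB (lst : List Int) :
    strange_sort_list_bst_alt lst = pvWeaveB (PySem.List.sorted lst (fun x => x) false) := by
  unfold strange_sort_list_bst_alt pvWeaveB
  simp only [PySem.List.foldl_append_eq_flatMap]
  split_ifs <;> simp

lemma pvWeaveB_step (x z : Int) (ys : List Int) :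
    pvWeaveB (x :: ys ++ [z]) = x :: z :: pvWeaveB ys := by
  unfold pvWeaveB
  have hm : (x :: ys ++ [z]).length = ys.length + 2 := by simp
  rw [hm]
  have h' : (ys.length + 2 + 1) / 2 = (ys.length + 1) / 2 + 1 := by omega
  have hle : (ys.length + 1) / 2 ≤ ys.length := by omega
  rw [h']
  have htake : (x :: ys ++ [z]).take ((ys.length + 1) / 2 + 1)
      = x :: ys.take ((ys.length + 1) / 2) := by
    simp [List.take_append_of_le_length hle]
  have hdrop : (x :: ys ++ [z]).drop ((ys.length + 1) / 2 + 1)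
      = ys.drop ((ys.length + 1) / 2) ++ [z] := by
    simp [List.drop_append_of_le_length hle]
  rw [htake, hdrop, List.reverse_append]
  simp only [List.reverse_singleton, List.singleton_append, List.zip_cons_cons,
    List.flatMap_cons]
  have hmod : (ys.length + 2) % 2 = ys.length % 2 := by omega
  rw [hmod]
  by_cases hodd : ys.length % 2 = 1
  · have hlt : ys.length / 2 < ys.length := by omega
    simp [hodd]
    rw [List.getElem?_append_left hlt]
  · simp [hodd]

lemma pvGoA_nil : pvGoA [] = [] := by rw [pvGoA.eq_def]

lemma pvGoA_cons_none {rest : List Int} (x : Int) (h : PySem.List.pop? rest = none) :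
    pvGoA (x :: rest) = [x] := by
  rw [pvGoA.eq_def]
  split
  · next heq => cases heq
  · next y rs heq =>
      injection heq with h1 h2
      subst h1; subst h2
      split
      · rfl
      · next y2 r2 hsome => rw [h] at hsome; cases hsome

lemma pvGoA_cons_some {rest rest' : List Int} (x y : Int)
    (h : PySem.List.pop? rest = some (y, rest')) :
    pvGoA (x :: rest) = x :: y :: pvGoA rest' := by
  rw [pvGoA.eq_def]
  split
  · next heq => cases heq
  · next a as heq =>
      injection heq with h1 h2
      subst h1; subst h2
      split
      · next hnone => rw [h] at hnone; cases hnone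
      · next y2 r2 hsome =>
          rw [h] at hsome
          injection hsome with h2
          injection h2 with hy hr
          subst hy; subst hr; rfl

lemma pvGoA_eq_weaveB (s : List Int) : pvGoA s = pvWeaveB s := by
  induction hn : s.length using Nat.strong_induction_on generalizing s with
  | _ n ih =>
    match s with
    | [] => simp [pvGoA_nil, pvWeaveB]
    | [x] =>
        rw [pvGoA_cons_none x (by decide)]
        simp [pvWeaveB]
    | x :: rest =>
        rcases rest.eq_nil_or_concat with rfl | ⟨ys, z, rfl⟩
        · rw [pvGoA_cons_none x (by decide)]
          simp [pvWeaveB]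
        · rw [List.concat_eq_append] at hn ⊢
          rw [pvGoA_cons_some x z (PySem.List.pop?_last ys z)]
          rw [← List.cons_append, pvWeaveB_step]
          have hlen : ys.length + 2 = n := by simpa using hn
          rw [ih ys.length (by omega) ys rfl]

-- ===== VERDICT (by name: the statement is the Claim_ definition above) =====
theorem strange_sort_list_bst_spec : Claim_equal_strange_sort_list_bst := by
  intro lst _
  unfold Spec_strange_sort_list_bst strange_sort_list_bst
  rw [pvAlt_eq_weaveB, pvGoA_eq_weaveB]
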